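-- pv_equiv track=rewrite | github.com/jolll4/plassi-api | networkApi/plassiNetwork/src/create_seating_order.py | cleanAvecs
-- ===== SOURCE A (Python) =====
-- def cleanAvecs(avecs: list):
--   empties = []
--   for pair in avecs:
--     if not pair[1] or pair[1] == "":
--       empties.append(pair)
--
--   for i in empties:
--     avecs.pop(avecs.index(i))
--
--   return avecs
-- ===== SOURCE B (Python) =====
-- def cleanAvecs(avecs: list):
--   avecs[:] = [pair for pair in avecs if pair[1]]
--   return avecs
-- ===== Notes on version B (the rewrite author's own statement) =====
-- stated objective: simpler
-- what changed: A collects the empty-second pairs and then removes each by a fresh linear index search plus pop; B keeps the non-empty pairs in a single filtering pass and assigns them back in place, so the collect-then-search-and-pop machinery disappears.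
import Mathlib
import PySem

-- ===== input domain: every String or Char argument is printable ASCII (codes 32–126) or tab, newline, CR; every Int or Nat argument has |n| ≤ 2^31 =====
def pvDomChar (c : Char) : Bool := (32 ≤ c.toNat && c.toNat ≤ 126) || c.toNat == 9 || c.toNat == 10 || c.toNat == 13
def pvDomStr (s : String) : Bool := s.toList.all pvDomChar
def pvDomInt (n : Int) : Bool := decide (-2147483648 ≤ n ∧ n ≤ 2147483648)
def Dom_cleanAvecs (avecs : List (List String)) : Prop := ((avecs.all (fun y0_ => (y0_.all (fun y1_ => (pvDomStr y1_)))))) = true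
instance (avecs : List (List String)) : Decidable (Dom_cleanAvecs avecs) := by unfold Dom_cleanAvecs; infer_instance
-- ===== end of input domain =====

-- B replaces A's collect-empties-then-pop-by-index-search removal with a single filtering
-- pass (objective: simpler). A mutates the list in place; B performs the same net in-place
-- update via slice assignment; the equivalence proved here is about the return value.

-- ===== PORT A =====
-- `not pair[1] or pair[1] == ""`: for a string both disjuncts are the test `pair[1] = ""`;
-- pyGet? = none is the IndexError case, excluded by Pre_.
def cleanAvecsEmpty (pair : List String) : Bool :=
  match PySem.List.pyGet? pair 1 with
  | some s => (s = "") || (s = "")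
  | none => false

def cleanAvecs (avecs : List (List String)) : List (List String) :=
  let empties := avecs.foldl (fun acc pair => if cleanAvecsEmpty pair then acc ++ [pair] else acc) []
  empties.foldl (fun st e =>
    match PySem.List.index? st e with
    | some i =>
      match PySem.List.pop? st (i : Int) with
      | some r => r.2
      | none => st
    | none => st) avecs

-- ===== PORT B =====
def cleanAvecs_alt (avecs : List (List String)) : List (List String) :=
  avecs.filter (fun pair =>
    match PySem.List.pyGet? pair 1 with
    | some s => !(s == "")
    | none => false)

-- ===== PRECONDITION & SPEC =====
-- A evaluates pair[1] on every element: a pair of length < 2 raises IndexError.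
def Pre_cleanAvecs (avecs : List (List String)) : Prop := ∀ p ∈ avecs, 2 ≤ p.length
instance (avecs : List (List String)) : Decidable (Pre_cleanAvecs avecs) := by unfold Pre_cleanAvecs; infer_instance

def pvWitness_cleanAvecs : List (List String) := [["a", ""], ["b", "x"], ["c", ""]]

def Spec_cleanAvecs (avecs : List (List String)) (out : List (List String)) : Prop := out = cleanAvecs_alt avecs
instance (avecs : List (List String)) (out : List (List String)) : Decidable (Spec_cleanAvecs avecs out) := by unfold Spec_cleanAvecs; infer_instance

-- ===== CLAIM (what is proved, stated in full; the proofs are below) =====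
def Claim_equal_cleanAvecs : Prop := ∀ (avecs : List (List String)), Dom_cleanAvecs avecs → Pre_cleanAvecs avecs → Spec_cleanAvecs avecs (cleanAvecs avecs)

-- ===== LEMMAS AND PROOFS =====

theorem eraseIdx_append_length {α : Type} (pre suf : List α) (e : α) :
    (pre ++ e :: suf).eraseIdx pre.length = pre ++ suf := by
  induction pre with
  | nil => rfl
  | cons a t ih => simpa using ih

-- the removal step of A is `List.erase` when the element is present
theorem cleanAvecs_step_erase (st : List (List String)) (e : List String) (he : e ∈ st) :
    (match PySem.List.index? st e with
     | some i =>
       match PySem.List.pop? st (i : Int) with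
       | some r => r.2
       | none => st
     | none => st) = st.erase e := by
  obtain ⟨i, hi⟩ := (PySem.List.index?_isSome_iff (xs := st) (v := e)).mpr he |> Option.isSome_iff_exists.mp
  obtain ⟨pre, suf, hst, hlen, hpre⟩ := (PySem.List.index?_eq_some_iff st e i).mp hi
  subst hst
  subst hlen
  rw [hi]
  have hilt : pre.length < (pre ++ e :: suf).length := by simp
  simp only [PySem.List.pop?_natCast _ _ hilt]
  rw [List.erase_append_right _ (by simpa using hpre), List.erase_cons_head _ _,
      eraseIdx_append_length pre suf e]

-- erasing the head of `l.filter c` removes exactly the first c-element of l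
theorem erase_first_filter (c : List String → Bool) :
    ∀ (l : List (List String)) (e : List String) (rest : List (List String)),
    l.filter c = e :: rest →
    (l.erase e).filter c = rest ∧ (l.erase e).filter (fun p => !c p) = l.filter (fun p => !c p) := by
  intro l
  induction l with
  | nil => intro e rest h; simp at h
  | cons a t ih =>
    intro e rest h
    by_cases hca : c a = true
    · rw [List.filter_cons_of_pos hca] at h
      obtain ⟨rfl, rfl⟩ : a = e ∧ t.filter c = rest := by
        exact ⟨List.head_eq_of_cons_eq h, List.tail_eq_of_cons_eq h⟩
      simp [hca]
    · rw [List.filter_cons_of_neg hca] at h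
      have hce : c e = true := by
        have : e ∈ t.filter c := by rw [h]; exact List.mem_cons_self
        exact (List.mem_filter.mp this).2
      have hne : (a == e) = false := by
        simp only [beq_eq_false_iff_ne]; rintro rfl; exact hca hce
      obtain ⟨h1, h2⟩ := ih e rest h
      rw [List.erase_cons, hne]
      constructor
      · simp [hca, h1]
      · simp [hca, h2]

-- folding A's removal step over the c-elements of l leaves exactly the non-c elements
theorem foldl_erase_filter (c : List String → Bool) :
    ∀ (es l : List (List String)), l.filter c = es →
    es.foldl (fun st e =>
      match PySem.List.index? st e with
      | some i =>
        match PySem.List.pop? st (i : Int) with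
        | some r => r.2
        | none => st
      | none => st) l = l.filter (fun p => !c p) := by
  intro es
  induction es with
  | nil =>
    intro l h
    have : ∀ p ∈ l, ¬ c p = true := by
      intro p hp hc
      have : p ∈ l.filter c := List.mem_filter.mpr ⟨hp, hc⟩
      simp [h] at this
    simp only [List.foldl_nil]
    rw [List.filter_eq_self.mpr (by intro p hp; simp [this p hp])]
  | cons e rest ih =>
    intro l h
    have hemem : e ∈ l := by
      have : e ∈ l.filter c := by rw [h]; exact List.mem_cons_self
      exact (List.mem_filter.mp this).1
    obtain ⟨h1, h2⟩ := erase_first_filter c l e rest h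
    rw [List.foldl_cons, cleanAvecs_step_erase l e hemem, ih (l.erase e) h1, h2]

-- ===== VERDICT (by name: the statement is the Claim_ definition above) =====
theorem cleanAvecs_spec : Claim_equal_cleanAvecs := by
  intro avecs _ hpre
  unfold Spec_cleanAvecs cleanAvecs cleanAvecs_alt
  rw [PySem.List.foldl_append_if_eq_filter, List.nil_append,
      foldl_erase_filter cleanAvecsEmpty (avecs.filter cleanAvecsEmpty) avecs rfl]
  apply List.filter_congr
  intro p hp
  have h1 : 1 < p.length := by have := hpre p hp; omega
  obtain ⟨a, b, t, rfl⟩ : ∃ a b t, p = a :: b :: t := by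
    match p, h1 with
    | a :: b :: t, _ => exact ⟨a, b, t, rfl⟩
  by_cases hb : b = "" <;> simp [cleanAvecsEmpty, PySem.List.pyGet?, PySem.List.pyIdx?, hb]
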